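-- pv_equiv track=rewrite | github.com/evan-ssh/ObjectOrientedPython | Final Exam Practice/VIPTickets.py | serveVIPTickets
-- ===== SOURCE A (Python) =====
-- class Stack:
--     def __init__(self):
--         self.stack = []
--
--     def push(self, element):
--         self.stack.append(element)
--
--     def pop(self):
--         if self.isEmpty():
--             return "Stack is empty"
--         return self.stack.pop()
--
--     def peek(self):
--         if self.isEmpty():
--             return "Stack is empty"
--         return self.stack[-1]
--
--     def isEmpty(self):
--         return len(self.stack) == 0
--
--     def size(self):
--         return len(self.stack)
--
-- class Queue:
--     def __init__(self):
--         self.queue = []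
--
--     def enqueue(self, element):
--         self.queue.append(element)
--
--     def dequeue(self):
--         if self.isEmpty():
--             return "Queue is empty"
--         return self.queue.pop(0)
--
--     def peek(self):
--         if self.isEmpty():
--             return "Queue is empty"
--         return self.queue[0]
--
--     def isEmpty(self):
--         return len(self.queue) == 0
--
--     def size(self):
--         return len(self.queue)
--
-- def serveVIPTickets(tickets,people):
--     stack = Stack()
--     queue = Queue()
--     for ticket in tickets:
--         stack.push(ticket)
--     for person in people:
--         queue.enqueue(person)
--
--     while not stack.isEmpty() and not queue.isEmpty():
--         served = False
--         for _ in range(queue.size()):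
--             ticket_number, is_vip = queue.peek()
--             if is_vip and ticket_number == stack.peek():
--                 queue.dequeue()
--                 stack.pop()
--                 served = True
--                 break
--             else:
--                 queue.enqueue(queue.dequeue())
--         if not served:
--             for _ in range(queue.size()):
--                 ticket_number, is_vip = queue.peek()
--                 if not is_vip and ticket_number == stack.peek():
--                     queue.dequeue()
--                     stack.pop()
--                     served = True
--                     break
--                 else:
--                     queue.enqueue(queue.dequeue())
--         if not served:
--             break
--     return queue.size()
-- ===== SOURCE B (Python) =====
-- def serveVIPTickets(tickets, people):
--     # Count people per ticket number, split by VIP flag; then scan the ticket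
--     # stack top-down, serving a matching VIP first, else a matching non-VIP,
--     # else stop. Only counts matter for the returned queue size.
--     vip = {}
--     non = {}
--     for t, v in people:
--         d = vip if v else non
--         d[t] = d.get(t, 0) + 1
--     served = 0
--     for t in reversed(tickets):
--         if vip.get(t, 0) > 0:
--             vip[t] -= 1
--         elif non.get(t, 0) > 0:
--             non[t] -= 1
--         else:
--             break
--         served += 1
--     return len(people) - served
-- ===== Notes on version B (the rewrite author's own statement) =====
-- stated objective: faster
-- what changed: Replaced the rotating-queue search (a full queue rotation per served ticket, with stack/queue objects) by two per-ticket counters built in one pass over people and a single top-down scan of tickets that decrements VIP-first, exploiting that only the remaining count is returned.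
import Mathlib
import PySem

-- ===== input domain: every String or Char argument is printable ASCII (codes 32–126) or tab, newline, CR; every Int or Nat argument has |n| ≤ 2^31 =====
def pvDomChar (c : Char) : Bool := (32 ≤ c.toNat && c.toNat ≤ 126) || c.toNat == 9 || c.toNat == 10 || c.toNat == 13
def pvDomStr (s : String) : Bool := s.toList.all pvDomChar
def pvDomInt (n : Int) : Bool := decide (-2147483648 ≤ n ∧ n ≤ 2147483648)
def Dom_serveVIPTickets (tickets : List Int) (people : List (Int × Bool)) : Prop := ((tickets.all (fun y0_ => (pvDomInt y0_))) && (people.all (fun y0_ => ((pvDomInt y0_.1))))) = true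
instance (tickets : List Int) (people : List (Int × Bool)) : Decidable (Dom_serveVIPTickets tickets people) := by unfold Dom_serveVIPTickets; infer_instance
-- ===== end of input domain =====

-- B replaces A's quadratic rotating-queue matching by per-ticket VIP/non-VIP counters and a
-- single top-down scan of the ticket stack (only the remaining COUNT is returned, so only
-- counts matter); equivalence of the RETURN value is proved (A mutates nothing observable).

-- ===== PORT A =====
-- one inner 'for _ in range(queue.size())' pass: rotate the queue looking for a person with
-- the wanted VIP flag and ticket == stack top; 'some q'' = served (q' is the queue after
-- the dequeue), 'none' = a full rotation without a match (queue back in its original order)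
def rotFind (top : Int) (vip : Bool) : Nat → List (Int × Bool) → Option (List (Int × Bool))
  | 0, _ => none
  | _ + 1, [] => none
  | n + 1, p :: rest =>
      if (p.2 == vip) && (p.1 == top) then some rest
      else rotFind top vip n (rest ++ [p])

-- the outer while loop; the stack shrinks on every served iteration
def serveLoop (stack : List Int) (queue : List (Int × Bool)) : Int :=
  if hs : stack = [] then (queue.length : Int)
  else if queue = [] then (queue.length : Int)
  else
    let top := stack.getLast hs
    match rotFind top true queue.length queue with
    | some q' => serveLoop stack.dropLast q'
    | none =>
      match rotFind top false queue.length queue with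
      | some q' => serveLoop stack.dropLast q'
      | none => (queue.length : Int)
termination_by stack.length
decreasing_by
  all_goals
    have := List.length_pos_of_ne_nil hs
    simp [List.length_dropLast]; omega

def serveVIPTickets (tickets : List Int) (people : List (Int × Bool)) : Int :=
  serveLoop tickets people

-- ===== PORT B =====
-- build the two counters vip / non (people per ticket number, split by VIP flag)
def buildCounts : List (Int × Bool) → PySem.Dict Int Int → PySem.Dict Int Int →
    PySem.Dict Int Int × PySem.Dict Int Int
  | [], vip, non => (vip, non)
  | (t, v) :: rest, vip, non =>
      if v then buildCounts rest (vip.insert t (vip.getD t 0 + 1)) non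
      else buildCounts rest vip (non.insert t (non.getD t 0 + 1))

-- the 'for t in reversed(tickets)' scan with break; returns the number served
def altServe : List Int → PySem.Dict Int Int → PySem.Dict Int Int → Int
  | [], _, _ => 0
  | t :: ts, vip, non =>
      if vip.getD t 0 > 0 then 1 + altServe ts (vip.insert t (vip.getD t 0 - 1)) non
      else if non.getD t 0 > 0 then 1 + altServe ts vip (non.insert t (non.getD t 0 - 1))
      else 0

def serveVIPTickets_alt (tickets : List Int) (people : List (Int × Bool)) : Int :=
  let cnts := buildCounts people PySem.Dict.empty PySem.Dict.empty
  (people.length : Int) - altServe tickets.reverse cnts.1 cnts.2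

-- ===== PRECONDITION & SPEC =====
def Spec_serveVIPTickets (tickets : List Int) (people : List (Int × Bool)) (out : Int) : Prop := out = serveVIPTickets_alt tickets people
instance (tickets : List Int) (people : List (Int × Bool)) (out : Int) : Decidable (Spec_serveVIPTickets tickets people out) := by unfold Spec_serveVIPTickets; infer_instance

-- ===== CLAIM (what is proved, stated in full; the proofs are below) =====
def Claim_equal_serveVIPTickets : Prop := ∀ (tickets : List Int) (people : List (Int × Bool)), Dom_serveVIPTickets tickets people → Spec_serveVIPTickets tickets people (serveVIPTickets tickets people)

-- ===== LEMMAS AND PROOFS =====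

-- reference function: tickets top-first, queue as a multiset; serve a VIP holder of the top
-- ticket if any, else a non-VIP holder, else stop; value = remaining queue length
def greedy : List Int → List (Int × Bool) → Int
  | [], ps => (ps.length : Int)
  | t :: ts, ps =>
      if (t, true) ∈ ps then greedy ts (ps.erase (t, true))
      else if (t, false) ∈ ps then greedy ts (ps.erase (t, false))
      else (ps.length : Int)

theorem rotFind_some {top : Int} {vip : Bool} :
    ∀ n (q q' : List (Int × Bool)), rotFind top vip n q = some q' →
      (top, vip) ∈ q ∧ q'.Perm (q.erase (top, vip)) := by
  intro n
  induction n with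
  | zero => intro q q' h; simp [rotFind] at h
  | succ n ih =>
    intro q q' h
    match q with
    | [] => simp [rotFind] at h
    | p :: rest =>
      rw [rotFind] at h
      by_cases hc : (p.2 == vip) && (p.1 == top)
      · rw [if_pos hc] at h
        have hp : p = (top, vip) := by
          simp at hc; obtain ⟨h1, h2⟩ := hc; cases p; simp_all
        subst hp
        injection h with h'
        subst h'
        exact ⟨List.mem_cons_self .., by simp [List.erase_cons_head]⟩
      · rw [if_neg hc] at h
        have hp : p ≠ (top, vip) := by
          intro he; subst he; simp at hc
        obtain ⟨hm, hperm⟩ := ih (rest ++ [p]) q' h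
        have hrot : (rest ++ [p]).Perm (p :: rest) := List.perm_append_singleton p rest
        refine ⟨?_, ?_⟩
        · rcases List.mem_append.mp hm with h1 | h1
          · exact List.mem_cons_of_mem _ h1
          · simp at h1; exact absurd h1.symm hp
        · exact hperm.trans (hrot.erase _)

theorem rotFind_none {top : Int} {vip : Bool} :
    ∀ n (q : List (Int × Bool)), n ≤ q.length → rotFind top vip n q = none →
      (top, vip) ∉ q.take n := by
  intro n
  induction n with
  | zero => intro q _ _; simp
  | succ n ih =>
    intro q hlen h
    match q with
    | [] => simp
    | p :: rest =>
      rw [rotFind] at h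
      by_cases hc : (p.2 == vip) && (p.1 == top)
      · rw [if_pos hc] at h; exact absurd h (by simp)
      · rw [if_neg hc] at h
        have hp : p ≠ (top, vip) := by intro he; subst he; simp at hc
        have hlen' : n ≤ rest.length := by simpa using hlen
        have := ih (rest ++ [p]) (by simp; omega) h
        rw [List.take_append_of_le_length hlen'] at this
        simp only [List.take_succ_cons, List.mem_cons]
        rintro (he | he)
        · exact hp he.symm
        · exact this he

theorem greedy_perm : ∀ (ts : List Int) {ps ps' : List (Int × Bool)}, ps.Perm ps' →
    greedy ts ps = greedy ts ps' := by
  intro ts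
  induction ts with
  | nil => intro ps ps' h; simp [greedy, h.length_eq]
  | cons t ts ih =>
    intro ps ps' h
    rw [greedy, greedy]
    by_cases h1 : (t, true) ∈ ps
    · rw [if_pos h1, if_pos (h.mem_iff.mp h1)]
      exact ih (h.erase _)
    · rw [if_neg h1, if_neg (fun hh => h1 (h.mem_iff.mpr hh))]
      by_cases h2 : (t, false) ∈ ps
      · rw [if_pos h2, if_pos (h.mem_iff.mp h2)]
        exact ih (h.erase _)
      · rw [if_neg h2, if_neg (fun hh => h2 (h.mem_iff.mpr hh))]
        exact_mod_cast h.length_eq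

theorem serveLoop_eq_greedy : ∀ (stack : List Int) (queue : List (Int × Bool)),
    serveLoop stack queue = greedy stack.reverse queue := by
  intro stack
  induction stack using List.reverseRecOn with
  | nil => intro q; rw [serveLoop]; simp [greedy]
  | append_singleton s t ih =>
    intro q
    have hs : s ++ [t] ≠ [] := by simp
    rw [serveLoop]
    rw [dif_neg hs]
    by_cases hq : q = []
    · subst hq
      simp [greedy, List.reverse_append]
    · rw [if_neg hq]
      have htop : (s ++ [t]).getLast hs = t := by simp
      have hdrop : (s ++ [t]).dropLast = s := by simp
      rw [List.reverse_append]
      simp only [List.reverse_singleton, List.singleton_append, greedy]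
      rw [htop, hdrop]
      cases hf1 : rotFind t true q.length q with
      | some q' =>
        obtain ⟨hm, hperm⟩ := rotFind_some _ _ _ hf1
        show serveLoop s q' = _
        rw [if_pos hm, ih q', greedy_perm _ hperm]
      | none =>
        have hnm1 : (t, true) ∉ q := by
          have := rotFind_none q.length q le_rfl hf1
          simpa [List.take_length] using this
        rw [if_neg hnm1]
        cases hf2 : rotFind t false q.length q with
        | some q' =>
          obtain ⟨hm, hperm⟩ := rotFind_some _ _ _ hf2
          show serveLoop s q' = _
          rw [if_pos hm, ih q', greedy_perm _ hperm]
        | none =>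
          have hnm2 : (t, false) ∉ q := by
            have := rotFind_none q.length q le_rfl hf2
            simpa [List.take_length] using this
          show (q.length : Int) = _
          rw [if_neg hnm2]

-- counter invariant linking B's dicts to the multiset of remaining people
def CntInv (vip non : PySem.Dict Int Int) (ps : List (Int × Bool)) : Prop :=
  ∀ t : Int, vip.getD t 0 = (ps.count (t, true) : Int) ∧
             non.getD t 0 = (ps.count (t, false) : Int)

theorem buildCounts_inv : ∀ (people : List (Int × Bool)) (vip non : PySem.Dict Int Int)
    (ps : List (Int × Bool)), CntInv vip non ps →
    CntInv (buildCounts people vip non).1 (buildCounts people vip non).2 (ps ++ people) := by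
  intro people
  induction people with
  | nil => intro vip non ps h; simpa [buildCounts] using h
  | cons p rest ih =>
    intro vip non ps h
    obtain ⟨t, v⟩ := p
    rw [buildCounts]
    have hstep : ∀ (d : PySem.Dict Int Int) (b : Bool),
        (∀ t' : Int, d.getD t' 0 = (ps.count (t', b) : Int)) →
        (∀ t' : Int, (d.insert t (d.getD t 0 + 1)).getD t' 0 = ((ps ++ [(t, b)]).count (t', b) : Int)) := by
      intro d b hd t'
      rw [PySem.Dict.getD_insert]
      by_cases he : t' = t
      · subst he
        simp [List.count_append, hd t']
      · rw [if_neg he, hd t']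
        have : List.count (t', b) [(t, b)] = 0 := by
          simp [List.count_cons]; intro hh; exact absurd hh.symm he
        simp [List.count_append, this]
    have hkeep : ∀ (b : Bool) (d : PySem.Dict Int Int),
        (∀ t' : Int, d.getD t' 0 = (ps.count (t', b) : Int)) →
        (∀ t' : Int, d.getD t' 0 = ((ps ++ [(t, !b)]).count (t', b) : Int)) := by
      intro b d hd t'
      have : List.count (t', b) [(t, !b)] = 0 := by
        simp
      simp [List.count_append, this, hd t']
    cases v with
    | true =>
      rw [if_pos rfl]
      have h' : CntInv (vip.insert t (vip.getD t 0 + 1)) non (ps ++ [(t, true)]) := by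
        intro t'
        refine ⟨hstep vip true (fun u => (h u).1) t', ?_⟩
        have := hkeep false non (fun u => (h u).2) t'
        simpa using this
      have := ih _ _ _ h'
      simpa [List.append_assoc] using this
    | false =>
      rw [if_neg (by simp)]
      have h' : CntInv vip (non.insert t (non.getD t 0 + 1)) (ps ++ [(t, false)]) := by
        intro t'
        refine ⟨?_, hstep non false (fun u => (h u).2) t'⟩
        have := hkeep true vip (fun u => (h u).1) t'
        simpa using this
      have := ih _ _ _ h'
      simpa [List.append_assoc] using this

theorem altServe_eq_greedy : ∀ (ts : List Int) (ps : List (Int × Bool))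
    (vip non : PySem.Dict Int Int), CntInv vip non ps →
    (ps.length : Int) - altServe ts vip non = greedy ts ps := by
  intro ts
  induction ts with
  | nil => intro ps vip non h; simp [altServe, greedy]
  | cons t ts ih =>
    intro ps vip non h
    rw [altServe, greedy]
    have hv := (h t).1
    have hn := (h t).2
    by_cases hm1 : (t, true) ∈ ps
    · have hc : 0 < ps.count (t, true) := List.count_pos_iff.mpr hm1
      rw [if_pos (by rw [hv]; exact_mod_cast hc), if_pos hm1]
      have h' : CntInv (vip.insert t (vip.getD t 0 - 1)) non (ps.erase (t, true)) := by
        intro t'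
        rw [PySem.Dict.getD_insert]
        constructor
        · by_cases he : t' = t
          · subst he
            rw [if_pos rfl, hv, List.count_erase_self]
            push_cast [Nat.cast_sub hc]
            ring_nf
          · rw [if_neg he, (h t').1, List.count_erase_of_ne (by simp [Ne, Prod.ext_iff]; intro hh; exact he hh)]
        · rw [(h t').2, List.count_erase_of_ne (by simp [Ne, Prod.ext_iff])]
      rw [← ih _ _ _ h']
      rw [List.length_erase_of_mem hm1]
      have hl : 0 < ps.length := List.length_pos_of_mem hm1
      push_cast [Nat.cast_sub hl]
      ring
    · have hc0 : ps.count (t, true) = 0 := by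
        rw [List.count_eq_zero]; exact hm1
      rw [if_neg (by rw [hv, hc0]; simp), if_neg hm1]
      by_cases hm2 : (t, false) ∈ ps
      · have hc : 0 < ps.count (t, false) := List.count_pos_iff.mpr hm2
        rw [if_pos (by rw [hn]; exact_mod_cast hc), if_pos hm2]
        have h' : CntInv vip (non.insert t (non.getD t 0 - 1)) (ps.erase (t, false)) := by
          intro t'
          rw [PySem.Dict.getD_insert]
          constructor
          · rw [(h t').1, List.count_erase_of_ne (by simp [Ne, Prod.ext_iff])]
          · by_cases he : t' = t
            · subst he
              rw [if_pos rfl, hn, List.count_erase_self]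
              push_cast [Nat.cast_sub hc]
              ring_nf
            · rw [if_neg he, (h t').2, List.count_erase_of_ne (by simp [Ne, Prod.ext_iff]; intro hh; exact he hh)]
        rw [← ih _ _ _ h']
        rw [List.length_erase_of_mem hm2]
        have hl : 0 < ps.length := List.length_pos_of_mem hm2
        push_cast [Nat.cast_sub hl]
        ring
      · have hc0' : ps.count (t, false) = 0 := by
          rw [List.count_eq_zero]; exact hm2
        rw [if_neg (by rw [hn, hc0']; simp), if_neg hm2]
        simp

-- ===== VERDICT (by name: the statement is the Claim_ definition above) =====
theorem serveVIPTickets_spec : Claim_equal_serveVIPTickets := by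
  intro tickets people _
  unfold Spec_serveVIPTickets serveVIPTickets serveVIPTickets_alt
  have hinv : CntInv (buildCounts people PySem.Dict.empty PySem.Dict.empty).1
      (buildCounts people PySem.Dict.empty PySem.Dict.empty).2 people := by
    have := buildCounts_inv people PySem.Dict.empty PySem.Dict.empty [] (by
      intro t; constructor <;> simp [PySem.Dict.getD, PySem.Dict.get?, PySem.Dict.empty])
    simpa using this
  rw [serveLoop_eq_greedy, ← altServe_eq_greedy tickets.reverse people _ _ hinv]
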